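-- pv_equiv track=rewrite | github.com/SaintMonguss/algorithm_programmers | 프로그래머스/1/42862. 체육복/체육복.py | solution
-- ===== SOURCE A (Python) =====
-- def solution(n, lost, reserve):
--     lost_set = set(lost) - set(reserve)
--     reserve_set = set(reserve) - set(lost)
--
--     for x in sorted(lost_set):
--         if x - 1 in reserve_set:
--             reserve_set.remove(x - 1)
--         elif x + 1 in reserve_set:
--             reserve_set.remove(x + 1)
--         else:
--             n -= 1
--     return n
-- ===== SOURCE B (Python) =====
-- def solution(n, lost, reserve):
--     ls = sorted(set(lost) - set(reserve))
--     rs = sorted(set(reserve) - set(lost))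
--     j = 0
--     for x in ls:
--         while j < len(rs) and rs[j] < x - 1:
--             j += 1
--         if j < len(rs) and (rs[j] == x - 1 or rs[j] == x + 1):
--             j += 1
--         else:
--             n -= 1
--     return n
-- ===== Notes on version B (the rewrite author's own statement) =====
-- stated objective: alternative
-- what changed: Replaces A's mutable reserve-set with membership tests and removals by a two-pointer sweep over the two sorted deduplicated lists, advancing one index monotonically through the reserves instead of deleting from a set.
import Mathlib
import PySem

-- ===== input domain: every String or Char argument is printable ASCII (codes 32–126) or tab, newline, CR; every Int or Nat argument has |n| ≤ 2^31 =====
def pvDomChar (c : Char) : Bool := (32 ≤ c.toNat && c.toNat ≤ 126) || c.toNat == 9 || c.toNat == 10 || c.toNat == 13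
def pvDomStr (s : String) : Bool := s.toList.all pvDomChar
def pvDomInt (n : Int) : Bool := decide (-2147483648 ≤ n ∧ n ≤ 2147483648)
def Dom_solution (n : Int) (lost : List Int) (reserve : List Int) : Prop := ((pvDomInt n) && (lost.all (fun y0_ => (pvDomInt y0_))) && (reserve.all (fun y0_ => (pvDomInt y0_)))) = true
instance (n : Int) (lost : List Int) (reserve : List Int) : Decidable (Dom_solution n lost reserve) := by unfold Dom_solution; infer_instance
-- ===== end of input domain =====

-- B replaces A's mutable reserve-set (membership tests + removals) with a single
-- two-pointer sweep over the two sorted deduplicated lists; alternative decomposition, same cost.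


-- ===== PORT A =====
-- one loop iteration of A: test x-1 then x+1 in the reserve set, removing the match
-- (Python's set.remove fires only under the membership guard, so it is Set.discard there)
def stepA (st : Int × PySem.Set Int) (x : Int) : Int × PySem.Set Int :=
  if (x - 1) ∈ st.2 then (st.1, PySem.Set.discard st.2 (x - 1))
  else if (x + 1) ∈ st.2 then (st.1, PySem.Set.discard st.2 (x + 1))
  else (st.1 - 1, st.2)

def solution (n : Int) (lost : List Int) (reserve : List Int) : Int :=
  let lostSet : PySem.Set Int := PySem.Set.diff (PySem.Set.ofList lost) reserve
  let reserveSet : PySem.Set Int := PySem.Set.diff (PySem.Set.ofList reserve) lost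
  ((PySem.List.sorted lostSet (fun x => x) false).foldl stepA (n, reserveSet)).1

-- ===== PORT B =====
-- the for-loop of Source B: ls is the remaining lost students, rs the reserve suffix from index j on;
-- the inner 'while' advancing j is the dropWhile on the suffix
def altGo (n : Int) (ls rs : List Int) : Int :=
  match ls with
  | [] => n
  | x :: ls' =>
    match rs.dropWhile (fun r => r < x - 1) with
    | [] => altGo (n - 1) ls' []
    | r :: rest =>
      if r = x - 1 ∨ r = x + 1 then altGo n ls' rest
      else altGo (n - 1) ls' (r :: rest)

def solution_alt (n : Int) (lost : List Int) (reserve : List Int) : Int :=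
  let ls := PySem.List.sorted (PySem.Set.diff (PySem.Set.ofList lost) reserve) (fun x => x) false
  let rs := PySem.List.sorted (PySem.Set.diff (PySem.Set.ofList reserve) lost) (fun x => x) false
  altGo n ls rs

-- ===== PRECONDITION & SPEC =====
def Spec_solution (n : Int) (lost : List Int) (reserve : List Int) (out : Int) : Prop := out = solution_alt n lost reserve
instance (n : Int) (lost : List Int) (reserve : List Int) (out : Int) : Decidable (Spec_solution n lost reserve out) := by unfold Spec_solution; infer_instance

-- ===== CLAIM (what is proved, stated in full; the proofs are below) =====
def Claim_equal_solution : Prop := ∀ (n : Int) (lost : List Int) (reserve : List Int), Dom_solution n lost reserve → Spec_solution n lost reserve (solution n lost reserve)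

-- ===== LEMMAS AND PROOFS =====

-- Invariant: A's current set S holds exactly B's remaining reserve suffix rs plus "junk"
-- elements that are too small (< x-1 for every remaining lost x) ever to be tested again.
lemma loop_eq : ∀ (ls : List Int) (n : Int) (S rs : List Int),
    ls.Pairwise (· < ·) → rs.Pairwise (· < ·) →
    (∀ x ∈ ls, x ∉ rs) →
    (∀ y ∈ S, y ∈ rs ∨ ∀ x ∈ ls, y < x - 1) →
    (∀ y ∈ rs, y ∈ S) →
    (ls.foldl stepA (n, S)).1 = altGo n ls rs := by
  intro ls
  induction ls with
  | nil => intro n S rs _ _ _ _ _; simp [altGo]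
  | cons x ls' ih =>
    intro n S rs hls hrs hdij hS hrsS
    have hx : x ∈ x :: ls' := List.mem_cons_self ..
    have hxls' : ∀ x' ∈ ls', x < x' := (List.pairwise_cons.mp hls).1
    have hls' : ls'.Pairwise (· < ·) := (List.pairwise_cons.mp hls).2
    -- split rs at the dropWhile point
    have hsplit : rs.takeWhile (fun r => decide (r < x - 1)) ++ rs.dropWhile (fun r => decide (r < x - 1)) = rs :=
      List.takeWhile_append_dropWhile
    have htake : ∀ y ∈ rs.takeWhile (fun r => decide (r < x - 1)), y < x - 1 := by
      intro y hy; simpa using List.mem_takeWhile_imp hy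
    have hdropsub : List.Sublist (rs.dropWhile (fun r => decide (r < x - 1))) rs :=
      List.dropWhile_sublist _
    have hdrops : (rs.dropWhile (fun r => decide (r < x - 1))).Pairwise (· < ·) :=
      hrs.sublist hdropsub
    -- junk survives to the next iteration
    have hjunk : ∀ y : Int, (∀ x'' ∈ x :: ls', y < x'' - 1) → ∀ x' ∈ ls', y < x' - 1 := by
      intro y h x' hx'; exact h x' (List.mem_cons_of_mem _ hx')
    have hsmall : ∀ y : Int, y < x - 1 → ∀ x' ∈ ls', y < x' - 1 := by
      intro y h x' hx'; have := hxls' x' hx'; omega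
    rcases hdw : rs.dropWhile (fun r => decide (r < x - 1)) with _ | ⟨r, rest⟩
    · -- dropWhile empty: everything in rs is < x-1, so neither x-1 nor x+1 is in S∩rs
      have hall : ∀ y ∈ rs, y < x - 1 := by
        intro y hy
        rw [← hsplit] at hy
        rcases List.mem_append.mp hy with h | h
        · exact htake y h
        · rw [hdw] at h; simp at h
      have hA : (x - 1) ∉ S := by
        intro h
        rcases hS _ h with h' | h'
        · have := hall _ h'; omega
        · have := h' x hx; omega
      have hB : (x + 1) ∉ S := by
        intro h
        rcases hS _ h with h' | h'
        · have := hall _ h'; omega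
        · have := h' x hx; omega
      have hstep : stepA (n, S) x = (n - 1, S) := by
        simp [stepA, hA, hB]
      rw [List.foldl_cons, hstep]
      simp only [altGo, hdw]
      exact ih (n - 1) S []
        hls' (by simp) (by simp) (fun y hy => Or.inr (by
          rcases hS y hy with h' | h'
          · exact hsmall y (hall y h')
          · exact hjunk y h')) (by simp)
    · -- dropWhile = r :: rest
      have hrrs : r ∈ rs := hdropsub.mem (by rw [hdw]; exact List.mem_cons_self ..)
      have hrge : ¬ (r < x - 1) := by
        have := List.head?_dropWhile_not (fun r => decide (r < x - 1)) rs
        rw [hdw] at this; simpa using this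
      have hrne : r ≠ x := by
        intro h; exact hdij x hx (h ▸ hrrs)
      have hrlt : ∀ y ∈ rest, r < y := by
        have := List.pairwise_cons.mp (hdw ▸ hdrops)
        exact this.1
      have hrestsub : List.Sublist rest rs := by
        have : List.Sublist (r :: rest) rs := hdw ▸ hdropsub
        exact (List.sublist_cons_self r rest).trans this
      have hrest : rest.Pairwise (· < ·) := (List.pairwise_cons.mp (hdw ▸ hdrops)).2
      have hdij' : ∀ x' ∈ ls', x' ∉ rest := fun x' hx' h =>
        hdij x' (List.mem_cons_of_mem _ hx') (hrestsub.mem h)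
      -- membership in rs reduces to membership in r :: rest for values ≥ x-1
      have hmem_ge : ∀ v : Int, ¬ (v < x - 1) → (v ∈ S → v = r ∨ v ∈ rest) := by
        intro v hvge hvS
        rcases hS v hvS with h' | h'
        · rw [← hsplit] at h'
          rcases List.mem_append.mp h' with h | h
          · exact absurd (htake v h) hvge
          · rw [hdw] at h
            exact List.mem_cons.mp h
        · have := h' x hx; omega
      by_cases hA : (x - 1) ∈ S
      · -- A removes x-1; B's head must be exactly x-1
        have : (x - 1) = r ∨ (x - 1) ∈ rest := hmem_ge (x - 1) (by omega) hA
        have hrx : r = x - 1 := by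
          rcases this with h | h
          · omega
          · have := hrlt _ h; omega
        have hstep : stepA (n, S) x = (n, PySem.Set.discard S (x - 1)) := by
          simp [stepA, hA]
        rw [List.foldl_cons, hstep]
        simp only [altGo, hdw]
        rw [if_pos (Or.inl hrx)]
        exact ih n (PySem.Set.discard S (x - 1)) rest hls' hrest hdij'
          (fun y hy => by
            have hyS : y ∈ S ∧ y ≠ x - 1 := (PySem.Set.mem_discard _ _ _).mp hy
            rcases hS y hyS.1 with h' | h'
            · rw [← hsplit] at h'
              rcases List.mem_append.mp h' with h | h
              · exact Or.inr (hsmall y (htake y h))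
              · rw [hdw] at h
                rcases List.mem_cons.mp h with h | h
                · exact absurd (h.trans hrx) hyS.2
                · exact Or.inl h
            · exact Or.inr (hjunk y h'))
          (fun y hy => (PySem.Set.mem_discard _ _ _).mpr
            ⟨hrsS y (hrestsub.mem hy), by have := hrlt y hy; omega⟩)
      · by_cases hB : (x + 1) ∈ S
        · -- A removes x+1; B's head must be exactly x+1
          have hx1rs : (x + 1) = r ∨ (x + 1) ∈ rest := hmem_ge (x + 1) (by omega) hB
          have hrx : r = x + 1 := by
            rcases hx1rs with h | h
            · omega
            · -- x+1 ∈ rest, so r < x+1; with r ≥ x-1, r ≠ x-1 (else hA), r ≠ x: contradiction unless r = x+1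
              have hlt := hrlt _ h
              have : r ≠ x - 1 := by
                intro hr; exact hA (hr ▸ hrsS r hrrs)
              omega
          have hstep : stepA (n, S) x = (n, PySem.Set.discard S (x + 1)) := by
            simp [stepA, hA, hB]
          rw [List.foldl_cons, hstep]
          simp only [altGo, hdw]
          rw [if_pos (Or.inr hrx)]
          exact ih n (PySem.Set.discard S (x + 1)) rest hls' hrest hdij'
            (fun y hy => by
              have hyS : y ∈ S ∧ y ≠ x + 1 := (PySem.Set.mem_discard _ _ _).mp hy
              rcases hS y hyS.1 with h' | h'
              · rw [← hsplit] at h'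
                rcases List.mem_append.mp h' with h | h
                · exact Or.inr (hsmall y (htake y h))
                · rw [hdw] at h
                  rcases List.mem_cons.mp h with h | h
                  · exact absurd (h.trans hrx) hyS.2
                  · exact Or.inl h
              · exact Or.inr (hjunk y h'))
            (fun y hy => (PySem.Set.mem_discard _ _ _).mpr
              ⟨hrsS y (hrestsub.mem hy), by have := hrlt y hy; omega⟩)
        · -- no match: r > x+1, both decrement
          have hrgt : ¬ (r = x - 1 ∨ r = x + 1) := by
            intro h
            rcases h with h | h
            · exact hA (h ▸ hrsS r hrrs)
            · exact hB (h ▸ hrsS r hrrs)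
          have hstep : stepA (n, S) x = (n - 1, S) := by
            simp [stepA, hA, hB]
          rw [List.foldl_cons, hstep]
          simp only [altGo, hdw]
          rw [if_neg hrgt]
          exact ih (n - 1) S (r :: rest) hls'
            (hdw ▸ hdrops)
            (fun x' hx' h => hdij x' (List.mem_cons_of_mem _ hx') ((hdw ▸ hdropsub).mem h))
            (fun y hy => by
              rcases hS y hy with h' | h'
              · rw [← hsplit] at h'
                rcases List.mem_append.mp h' with h | h
                · exact Or.inr (hsmall y (htake y h))
                · exact Or.inl (hdw ▸ h)
              · exact Or.inr (hjunk y h'))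
            (fun y hy => hrsS y ((hdw ▸ hdropsub).mem hy))

-- sorted of a Nodup list is strictly increasing
lemma sorted_pairwise_lt_of_nodup (xs : List Int) (h : xs.Nodup) :
    (PySem.List.sorted xs (fun x => x) false).Pairwise (· < ·) := by
  have e : PySem.Set.ofList xs = xs := PySem.Set.ofList_eq_self_of_nodup _ h
  rw [← e]
  exact PySem.List.sorted_ofList_pairwise_lt xs

-- ===== VERDICT (by name: the statement is the Claim_ definition above) =====
theorem solution_spec : Claim_equal_solution := by
  intro n lost reserve _
  unfold Spec_solution solution solution_alt
  apply loop_eq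
  · exact sorted_pairwise_lt_of_nodup _ (PySem.Set.nodup_diff _ _ (PySem.Set.nodup_ofList lost))
  · exact sorted_pairwise_lt_of_nodup _ (PySem.Set.nodup_diff _ _ (PySem.Set.nodup_ofList reserve))
  · intro x hx hx'
    rw [PySem.List.mem_sorted] at hx hx'
    rw [PySem.Set.mem_diff] at hx hx'
    exact hx.2 ((PySem.Set.mem_ofList _ _).mp hx'.1)
  · intro y hy; exact Or.inl ((PySem.List.mem_sorted _ _ _ _).mpr hy)
  · intro y hy; exact (PySem.List.mem_sorted _ _ _ _).mp hy
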